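-- pv_equiv track=rewrite | github.com/johnwingit/gzJinHong | pdfviewer/Parse_strtonum.py | Parse_strtonum
-- ===== SOURCE A (Python) =====
-- def Parse_strtonum(pastr):  #判断是否是材料型号编号
--     str = pastr+"a"
--     count = 0
--     length = 7 #定义字符串中>=7个数字的序列输出
--     temp = []
--     dig = []
--     for i in range(str.__len__()):
--         if (str[i] >= '0' and str[i] <= '9'):
--             # 数字加一
--             count += 1
--             temp.append(str[i])  #append在列表末尾添加新的对象
--         else:
--             if count >= length:
--                 # 数字串大于之前的
--                 length = count
--                 count = 0
--                 str1 = ''.join(temp)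
--                 dig.append(str1)
--                 temp = []
--             else:
--                 # 数字串较短则清空
--                 temp = []
--                 count = 0
--         # 结果输出
--     return dig
-- ===== SOURCE B (Python) =====
-- def Parse_strtonum(pastr):
--     # Phase 1: extract all maximal digit runs with a two-pointer scan.
--     runs = []
--     i, n = 0, len(pastr)
--     while i < n:
--         if '0' <= pastr[i] <= '9':
--             j = i
--             while j < n and '0' <= pastr[j] <= '9':
--                 j += 1
--             runs.append(pastr[i:j])
--             i = j
--         else:
--             i += 1
--     # Phase 2: keep runs meeting the growing length threshold (starts at 7).
--     dig = []
--     length = 7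
--     for run in runs:
--         if len(run) >= length:
--             dig.append(run)
--             length = len(run)
--     return dig
-- ===== Notes on version B (the rewrite author's own statement) =====
-- stated objective: alternative
-- what changed: A's single char-by-char scan with a mutable buffer, counter and an appended sentinel character is replaced by a two-phase decomposition: first extract all maximal digit runs with a two-pointer scan, then filter that run list against the growing length threshold.
import Mathlib
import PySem

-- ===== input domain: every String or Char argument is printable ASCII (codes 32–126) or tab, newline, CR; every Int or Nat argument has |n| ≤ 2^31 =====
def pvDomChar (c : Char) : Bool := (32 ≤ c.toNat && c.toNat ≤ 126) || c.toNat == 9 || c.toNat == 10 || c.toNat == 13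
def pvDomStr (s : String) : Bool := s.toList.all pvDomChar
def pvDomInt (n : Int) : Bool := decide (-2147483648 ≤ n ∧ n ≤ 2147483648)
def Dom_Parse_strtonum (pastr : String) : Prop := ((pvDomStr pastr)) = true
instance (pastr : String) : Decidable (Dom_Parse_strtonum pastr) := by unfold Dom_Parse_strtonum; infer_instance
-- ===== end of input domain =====

-- B replaces A's char-by-char buffer-and-sentinel scan by a two-phase decomposition
-- (extract all maximal digit runs, then filter by the growing threshold); alternative, not faster.

-- ===== PORT A =====
-- A's for-loop over (pastr + "a") with state (count, length, temp, dig); ''.join(temp) = String.ofList temp.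
def parseALoop : List Char → Int → Int → List Char → List String → List String
  | [], _, _, _, dig => dig
  | c :: rest, count, length, temp, dig =>
    if '0' ≤ c ∧ c ≤ '9' then
      parseALoop rest (count + 1) length (temp ++ [c]) dig
    else
      if count ≥ length then
        parseALoop rest 0 count [] (dig ++ [String.ofList temp])
      else
        parseALoop rest 0 length [] dig

def Parse_strtonum (pastr : String) : List String :=
  parseALoop (pastr.toList ++ ['a']) 0 7 [] []

-- ===== PORT B =====
def isDigB (c : Char) : Bool := decide ('0' ≤ c ∧ c ≤ '9')

-- Phase 1 of Source B: the outer while with the inner two-pointer while; the inner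
-- advance `j` over digits and the slice pastr[i:j] are exactly takeWhile/dropWhile.
def runsB : List Char → List (List Char)
  | [] => []
  | c :: rest =>
    if isDigB c then
      ((c :: rest).takeWhile isDigB) :: runsB ((c :: rest).dropWhile isDigB)
    else
      runsB rest
termination_by cs => cs.length
decreasing_by
  · simp only [List.dropWhile_cons, *]
    exact Nat.lt_succ_of_le (List.length_dropWhile_le _ _)
  · simp

-- Phase 2 of Source B: filter runs by the growing threshold.
def filtB : Int → List (List Char) → List (List Char)
  | _, [] => []
  | length, r :: rs =>
    if (r.length : Int) ≥ length then r :: filtB (r.length : Int) rs else filtB length rs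

-- Source B works on Python strings; the port works on List Char and converts at the end.
def Parse_strtonum_alt (pastr : String) : List String :=
  (filtB 7 (runsB pastr.toList)).map String.ofList

-- ===== PRECONDITION & SPEC =====
def Spec_Parse_strtonum (pastr : String) (out : List String) : Prop := out = Parse_strtonum_alt pastr
instance (pastr : String) (out : List String) : Decidable (Spec_Parse_strtonum pastr out) := by unfold Spec_Parse_strtonum; infer_instance

-- ===== CLAIM (what is proved, stated in full; the proofs are below) =====
def Claim_equal_Parse_strtonum : Prop := ∀ (pastr : String), Dom_Parse_strtonum pastr → Spec_Parse_strtonum pastr (Parse_strtonum pastr)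

-- ===== LEMMAS AND PROOFS =====

lemma takeWhile_append_all {p : Char → Bool} {l t : List Char} (h : ∀ x ∈ l, p x = true) :
    (l ++ t).takeWhile p = l ++ t.takeWhile p := by
  induction l with
  | nil => simp
  | cons a l ih =>
      simp only [List.cons_append, List.takeWhile_cons, h a (by simp)]
      simp [ih (fun x hx => h x (by simp [hx]))]

lemma dropWhile_append_all {p : Char → Bool} {l t : List Char} (h : ∀ x ∈ l, p x = true) :
    (l ++ t).dropWhile p = t.dropWhile p := by
  induction l with
  | nil => simp
  | cons a l ih =>
      simp only [List.cons_append, List.dropWhile_cons, h a (by simp)]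
      exact ih (fun x hx => h x (by simp [hx]))

lemma runsB_nondigit (c : Char) (cs : List Char) (hc : isDigB c = false) :
    runsB (c :: cs) = runsB cs := by
  rw [runsB]; simp [hc]

-- a nonempty all-digit buffer followed by a non-digit char closes as one run
lemma runsB_run (temp : List Char) (c : Char) (cs : List Char)
    (hne : temp ≠ []) (hall : ∀ x ∈ temp, isDigB x = true) (hc : isDigB c = false) :
    runsB (temp ++ c :: cs) = temp :: runsB cs := by
  cases temp with
  | nil => exact absurd rfl hne
  | cons d t =>
      have hd : isDigB d = true := hall d (by simp)
      have hall' : ∀ x ∈ d :: t ++ c :: cs, x ∈ (d :: t) ++ c :: cs := by simp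
      rw [List.cons_append, runsB]
      simp only [hd, if_true]
      rw [show d :: (t ++ c :: cs) = (d :: t) ++ c :: cs from rfl,
          takeWhile_append_all hall, dropWhile_append_all hall,
          List.takeWhile_cons, List.dropWhile_cons, hc]
      simp [runsB_nondigit c cs hc]

-- main invariant: A's loop with buffer temp (all digits, count = temp.length) and
-- threshold L ≥ 1 computes dig ++ the filtered runs of (temp ++ cs).
lemma loopA_eq (cs : List Char) : ∀ (temp : List Char) (L : Int) (dig : List String),
    (∀ x ∈ temp, isDigB x = true) → 1 ≤ L →
    parseALoop (cs ++ ['a']) (temp.length : Int) L temp dig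
      = dig ++ (filtB L (runsB (temp ++ cs))).map String.ofList := by
  induction cs with
  | nil =>
      intro temp L dig hall hL
      simp only [List.nil_append, List.append_nil, parseALoop]
      have hcond : ¬ ('0' ≤ 'a' ∧ 'a' ≤ '9') := by decide
      rw [if_neg hcond]
      cases temp with
      | nil =>
          have h0 : ¬ ((0 : Int) ≥ L) := by omega
          simp [h0, runsB, filtB]
      | cons d t =>
          have hd := hall d (by simp)
          have h1 := takeWhile_append_all (t := ([] : List Char)) hall
          have h2 := dropWhile_append_all (t := ([] : List Char)) hall
          simp only [List.append_nil] at h1 h2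
          have hrun : runsB (d :: t) = [d :: t] := by
            rw [runsB]; simp [hd, h1, h2, runsB]
          by_cases hge : (((d :: t).length : Int) ≥ L)
          · rw [if_pos hge]
            have h' : L ≤ (t.length : Int) + 1 := by simp only [List.length_cons] at hge; push_cast at hge; omega
            simp [hrun, filtB, h']
          · rw [if_neg hge]
            have h' : ¬ (L ≤ (t.length : Int) + 1) := by simp only [List.length_cons] at hge; push_cast at hge; omega
            simp [hrun, filtB, h']
  | cons c cs ih =>
      intro temp L dig hall hL
      rw [List.cons_append, parseALoop]
      by_cases hcd : ('0' ≤ c ∧ c ≤ '9')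
      · rw [if_pos hcd]
        have hall' : ∀ x ∈ temp ++ [c], isDigB x = true := by
          intro x hx
          rcases List.mem_append.1 hx with h | h
          · exact hall x h
          · simp only [List.mem_singleton] at h; subst h; simp [isDigB, hcd]
        have := ih (temp ++ [c]) L dig hall' hL
        rw [List.length_append] at this
        push_cast at this ⊢
        rw [List.append_assoc] at this
        simpa using this
      · have hc : isDigB c = false := by simp [isDigB, hcd]
        rw [if_neg hcd]
        by_cases hge : ((temp.length : Int) ≥ L)
        · rw [if_pos hge]
          have hne : temp ≠ [] := by
            intro h; subst h; simp at hge; omega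
          have h1 : (1 : Int) ≤ (temp.length : Int) := by omega
          have := ih [] (temp.length : Int) (dig ++ [String.ofList temp]) (by simp) h1
          simp only [List.length_nil, Int.natCast_zero, List.nil_append] at this
          rw [this, runsB_run temp c cs hne hall hc, filtB, if_pos hge]
          simp
        · rw [if_neg hge]
          have := ih [] L dig (by simp) hL
          simp only [List.length_nil, Int.natCast_zero, List.nil_append] at this
          rw [this]
          cases temp with
          | nil => rw [List.nil_append, runsB_nondigit c cs hc]
          | cons d t =>
              rw [runsB_run (d :: t) c cs (by simp) hall hc, filtB, if_neg hge]

-- ===== VERDICT (by name: the statement is the Claim_ definition above) =====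
theorem Parse_strtonum_spec : Claim_equal_Parse_strtonum := by
  intro pastr _
  unfold Spec_Parse_strtonum Parse_strtonum Parse_strtonum_alt
  have := loopA_eq pastr.toList [] 7 [] (by simp) (by norm_num)
  simpa using this
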